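-- pv_equiv track=rewrite | github.com/HanSur94/city-data-platform | backend/app/connectors/police.py | _categorize_report
-- ===== SOURCE A (Python) =====
-- def _categorize_report(title: str, description: str) -> str:
--     """Categorize a police report based on keywords."""
--     text = f"{title} {description}".lower()
--     if any(w in text for w in ['unfall', 'verkehrsunfall', 'kollision']):
--         return 'accident'
--     if any(w in text for w in ['einbruch', 'diebstahl', 'raub']):
--         return 'theft'
--     if any(w in text for w in ['brand', 'feuer']):
--         return 'fire'
--     if any(w in text for w in ['vermisst', 'suche']):
--         return 'missing'
--     if any(w in text for w in ['betrug', 'taeuschung']):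
--         return 'fraud'
--     return 'general'
-- ===== SOURCE B (Python) =====
-- PRIORITY = ['accident', 'theft', 'fire', 'missing', 'fraud']
--
-- KEYWORD_RANK = {
--     'unfall': 0, 'verkehrsunfall': 0, 'kollision': 0,
--     'einbruch': 1, 'diebstahl': 1, 'raub': 1,
--     'brand': 2, 'feuer': 2,
--     'vermisst': 3, 'suche': 3,
--     'betrug': 4, 'taeuschung': 4,
-- }
--
--
-- def _categorize_report(title: str, description: str) -> str:
--     """Categorize a police report based on keywords."""
--     text = f"{title} {description}".lower()
--     ranks = [r for kw, r in KEYWORD_RANK.items() if kw in text]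
--     return PRIORITY[min(ranks)] if ranks else 'general'
-- ===== Notes on version B (the rewrite author's own statement) =====
-- stated objective: alternative
-- what changed: Replaced A's short-circuiting category-by-category if-cascade with a single full pass over a flat keyword->rank map that collects the ranks of all matching keywords and returns the priority name of the minimum rank (no early exit, keyword-level traversal, min-aggregation instead of first-match).
import Mathlib
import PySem

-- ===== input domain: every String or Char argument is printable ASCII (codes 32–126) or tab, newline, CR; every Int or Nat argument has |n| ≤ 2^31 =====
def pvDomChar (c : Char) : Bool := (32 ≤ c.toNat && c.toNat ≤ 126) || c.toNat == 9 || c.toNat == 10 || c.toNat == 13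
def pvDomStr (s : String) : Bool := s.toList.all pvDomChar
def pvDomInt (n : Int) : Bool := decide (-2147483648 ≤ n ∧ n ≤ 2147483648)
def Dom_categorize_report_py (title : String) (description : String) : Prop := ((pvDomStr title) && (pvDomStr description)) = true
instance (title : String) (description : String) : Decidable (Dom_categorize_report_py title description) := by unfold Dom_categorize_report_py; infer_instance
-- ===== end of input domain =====

-- B replaces A's short-circuiting if-cascade with one full pass over a flat keyword->rank map, returning the priority name of the minimum matching rank (alternative decomposition; same cost).


-- ===== PORT A =====
def categorize_report_py (title : String) (description : String) : String :=
  let text := PySem.Str.lower (title ++ " " ++ description)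
  if (["unfall", "verkehrsunfall", "kollision"].any (fun w => PySem.Str.isIn w text)) then "accident"
  else if (["einbruch", "diebstahl", "raub"].any (fun w => PySem.Str.isIn w text)) then "theft"
  else if (["brand", "feuer"].any (fun w => PySem.Str.isIn w text)) then "fire"
  else if (["vermisst", "suche"].any (fun w => PySem.Str.isIn w text)) then "missing"
  else if (["betrug", "taeuschung"].any (fun w => PySem.Str.isIn w text)) then "fraud"
  else "general"

-- ===== PORT B =====
def pvPriority : List String := ["accident", "theft", "fire", "missing", "fraud"]

-- KEYWORD_RANK dict → association list in insertion order
def pvKeywordRank : List (String × Int) :=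
  [("unfall", 0), ("verkehrsunfall", 0), ("kollision", 0),
   ("einbruch", 1), ("diebstahl", 1), ("raub", 1),
   ("brand", 2), ("feuer", 2),
   ("vermisst", 3), ("suche", 3),
   ("betrug", 4), ("taeuschung", 4)]

def categorize_report_py_alt (title : String) (description : String) : String :=
  let text := PySem.Str.lower (title ++ " " ++ description)
  let ranks := (pvKeywordRank.filter (fun p => PySem.Str.isIn p.1 text)).map (fun p => p.2)
  match PySem.List.min? ranks (fun r => r) with
  | none => "general"                                         -- 'if ranks else' branch
  | some m => (PySem.List.pyGet? pvPriority m).getD "general" -- PRIORITY[min(ranks)]; the rank is always 0..4, so in range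

-- ===== PRECONDITION & SPEC =====
def Spec_categorize_report_py (title : String) (description : String) (out : String) : Prop := out = categorize_report_py_alt title description
instance (title : String) (description : String) (out : String) : Decidable (Spec_categorize_report_py title description out) := by unfold Spec_categorize_report_py; infer_instance

-- ===== CLAIM (what is proved, stated in full; the proofs are below) =====
def Claim_equal_categorize_report_py : Prop := ∀ (title : String) (description : String), Dom_categorize_report_py title description → Spec_categorize_report_py title description (categorize_report_py title description)

-- ===== LEMMAS AND PROOFS =====

-- ===== VERDICT (by name: the statement is the Claim_ definition above) =====
-- Helper abstractions of the two ports over the 12 keyword-containment booleans (proof-only).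
def pvChain (b1 b2 b3 b4 b5 b6 b7 b8 b9 b10 b11 b12 : Bool) : String :=
  if (b1 || (b2 || (b3 || false))) = true then "accident"
  else if (b4 || (b5 || (b6 || false))) = true then "theft"
  else if (b7 || (b8 || false)) = true then "fire"
  else if (b9 || (b10 || false)) = true then "missing"
  else if (b11 || (b12 || false)) = true then "fraud"
  else "general"

def pvTl12 (b12 : Bool) : List (String × Int) :=
  match b12 with | true => [("taeuschung", (4:Int))] | false => []

def pvTl11 (b11 b12 : Bool) : List (String × Int) :=
  match b11 with
  | true => ("betrug", (4:Int)) :: pvTl12 b12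
  | false => pvTl12 b12

def pvTl10 (b10 b11 b12 : Bool) : List (String × Int) :=
  match b10 with
  | true => ("suche", (3:Int)) :: pvTl11 b11 b12
  | false => pvTl11 b11 b12

def pvTl9 (b9 b10 b11 b12 : Bool) : List (String × Int) :=
  match b9 with
  | true => ("vermisst", (3:Int)) :: pvTl10 b10 b11 b12
  | false => pvTl10 b10 b11 b12

def pvTl8 (b8 b9 b10 b11 b12 : Bool) : List (String × Int) :=
  match b8 with
  | true => ("feuer", (2:Int)) :: pvTl9 b9 b10 b11 b12
  | false => pvTl9 b9 b10 b11 b12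

def pvTl7 (b7 b8 b9 b10 b11 b12 : Bool) : List (String × Int) :=
  match b7 with
  | true => ("brand", (2:Int)) :: pvTl8 b8 b9 b10 b11 b12
  | false => pvTl8 b8 b9 b10 b11 b12

def pvTl6 (b6 b7 b8 b9 b10 b11 b12 : Bool) : List (String × Int) :=
  match b6 with
  | true => ("raub", (1:Int)) :: pvTl7 b7 b8 b9 b10 b11 b12
  | false => pvTl7 b7 b8 b9 b10 b11 b12

def pvTl5 (b5 b6 b7 b8 b9 b10 b11 b12 : Bool) : List (String × Int) :=
  match b5 with
  | true => ("diebstahl", (1:Int)) :: pvTl6 b6 b7 b8 b9 b10 b11 b12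
  | false => pvTl6 b6 b7 b8 b9 b10 b11 b12

def pvTl4 (b4 b5 b6 b7 b8 b9 b10 b11 b12 : Bool) : List (String × Int) :=
  match b4 with
  | true => ("einbruch", (1:Int)) :: pvTl5 b5 b6 b7 b8 b9 b10 b11 b12
  | false => pvTl5 b5 b6 b7 b8 b9 b10 b11 b12

def pvTl3 (b3 b4 b5 b6 b7 b8 b9 b10 b11 b12 : Bool) : List (String × Int) :=
  match b3 with
  | true => ("kollision", (0:Int)) :: pvTl4 b4 b5 b6 b7 b8 b9 b10 b11 b12
  | false => pvTl4 b4 b5 b6 b7 b8 b9 b10 b11 b12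

def pvTl2 (b2 b3 b4 b5 b6 b7 b8 b9 b10 b11 b12 : Bool) : List (String × Int) :=
  match b2 with
  | true => ("verkehrsunfall", (0:Int)) :: pvTl3 b3 b4 b5 b6 b7 b8 b9 b10 b11 b12
  | false => pvTl3 b3 b4 b5 b6 b7 b8 b9 b10 b11 b12

def pvTl1 (b1 b2 b3 b4 b5 b6 b7 b8 b9 b10 b11 b12 : Bool) : List (String × Int) :=
  match b1 with
  | true => ("unfall", (0:Int)) :: pvTl2 b2 b3 b4 b5 b6 b7 b8 b9 b10 b11 b12
  | false => pvTl2 b2 b3 b4 b5 b6 b7 b8 b9 b10 b11 b12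

def pvRanksFn (b1 b2 b3 b4 b5 b6 b7 b8 b9 b10 b11 b12 : Bool) : List Int :=
  List.map (fun p => p.2) (pvTl1 b1 b2 b3 b4 b5 b6 b7 b8 b9 b10 b11 b12)

def pvMinFn (b1 b2 b3 b4 b5 b6 b7 b8 b9 b10 b11 b12 : Bool) : String :=
  match PySem.List.min? (pvRanksFn b1 b2 b3 b4 b5 b6 b7 b8 b9 b10 b11 b12) (fun r => r) with
  | none => "general"
  | some m => (PySem.List.pyGet? pvPriority m).getD "general"

theorem pvChain_eq_pvMinFn : ∀ b1 b2 b3 b4 b5 b6 b7 b8 b9 b10 b11 b12 : Bool,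
    pvChain b1 b2 b3 b4 b5 b6 b7 b8 b9 b10 b11 b12 = pvMinFn b1 b2 b3 b4 b5 b6 b7 b8 b9 b10 b11 b12 := by
  decide

set_option maxHeartbeats 4000000 in
theorem categorize_report_py_spec : Claim_equal_categorize_report_py := by
  intro title description _
  exact pvChain_eq_pvMinFn
    (PySem.Str.isIn "unfall" (PySem.Str.lower (title ++ " " ++ description)))
    (PySem.Str.isIn "verkehrsunfall" (PySem.Str.lower (title ++ " " ++ description)))
    (PySem.Str.isIn "kollision" (PySem.Str.lower (title ++ " " ++ description)))
    (PySem.Str.isIn "einbruch" (PySem.Str.lower (title ++ " " ++ description)))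
    (PySem.Str.isIn "diebstahl" (PySem.Str.lower (title ++ " " ++ description)))
    (PySem.Str.isIn "raub" (PySem.Str.lower (title ++ " " ++ description)))
    (PySem.Str.isIn "brand" (PySem.Str.lower (title ++ " " ++ description)))
    (PySem.Str.isIn "feuer" (PySem.Str.lower (title ++ " " ++ description)))
    (PySem.Str.isIn "vermisst" (PySem.Str.lower (title ++ " " ++ description)))
    (PySem.Str.isIn "suche" (PySem.Str.lower (title ++ " " ++ description)))
    (PySem.Str.isIn "betrug" (PySem.Str.lower (title ++ " " ++ description)))
    (PySem.Str.isIn "taeuschung" (PySem.Str.lower (title ++ " " ++ description)))
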